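-- pv_equiv track=rewrite | github.com/changquanyou/visual_caption | visgen/data/phrase_test.py | load_phrase_data
-- ===== SOURCE A (Python) =====
-- def load_phrase_data(phrase):
--     data_list = []
--     words = str.split(phrase)
--     words.insert(0, "#BEGIN#")
--     words.append("#END#")
--     for word_index, word in enumerate(words):
--         if word_index > 0:
--             input_seq = words[:word_index]
--             target_seq = words[:word_index + 1]
--             data_list.append((input_seq, target_seq))
--     return data_list
-- ===== SOURCE B (Python) =====
-- def load_phrase_data(phrase):
--     words = ["#BEGIN#"] + str.split(phrase) + ["#END#"]
--     result = []
--     prefix = []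
--     for word in words:
--         prev = prefix
--         prefix = prefix + [word]
--         if prev:
--             result.append((prev, prefix))
--     return result
-- ===== Notes on version B (the rewrite author's own statement) =====
-- stated objective: alternative
-- what changed: Replaces re-slicing words[:k] and words[:k+1] at every index of an enumerate loop with a single pass that threads a growing prefix list, emitting (prev, prefix) as each word extends it.
import Mathlib
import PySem

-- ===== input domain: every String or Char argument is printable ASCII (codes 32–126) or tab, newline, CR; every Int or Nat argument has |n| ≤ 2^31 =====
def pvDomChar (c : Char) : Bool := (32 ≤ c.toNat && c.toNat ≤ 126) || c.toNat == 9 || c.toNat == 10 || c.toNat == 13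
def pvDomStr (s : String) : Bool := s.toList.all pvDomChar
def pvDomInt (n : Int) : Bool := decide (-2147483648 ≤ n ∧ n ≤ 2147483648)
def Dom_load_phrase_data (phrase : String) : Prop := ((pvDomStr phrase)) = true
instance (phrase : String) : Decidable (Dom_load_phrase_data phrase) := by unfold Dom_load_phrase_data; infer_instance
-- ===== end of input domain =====

-- B replaces A's per-index re-slicing of words with a single pass threading a growing prefix (alternative decomposition, same asymptotic cost).

-- ===== PORT A =====
def load_phrase_data (phrase : String) : List (List String × List String) :=
  let data_list : List (List String × List String) := []
  let words := PySem.Str.split₀ phrase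
  let words := PySem.List.insert words 0 "#BEGIN#"
  let words := words ++ ["#END#"]
  (PySem.List.enumerate words 0).foldl (fun acc p =>
    if p.1 > 0 then
      acc ++ [(PySem.List.slice words none (some p.1),
               PySem.List.slice words none (some (p.1 + 1)))]
    else acc) data_list

-- ===== PORT B =====
def load_phrase_data_alt (phrase : String) : List (List String × List String) :=
  let words := "#BEGIN#" :: PySem.Str.split₀ phrase ++ ["#END#"]
  (words.foldl (fun st w =>
      let prev := st.1
      let prefx := st.1 ++ [w]
      (prefx, if prev ≠ [] then st.2 ++ [(prev, prefx)] else st.2))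
    (([] : List String), ([] : List (List String × List String)))).2

-- ===== PRECONDITION & SPEC =====
def Spec_load_phrase_data (phrase : String) (out : List (List String × List String)) : Prop := out = load_phrase_data_alt phrase
instance (phrase : String) (out : List (List String × List String)) : Decidable (Spec_load_phrase_data phrase out) := by unfold Spec_load_phrase_data; infer_instance

-- ===== CLAIM (what is proved, stated in full; the proofs are below) =====
def Claim_equal_load_phrase_data : Prop := ∀ (phrase : String), Dom_load_phrase_data phrase → Spec_load_phrase_data phrase (load_phrase_data phrase)

-- ===== LEMMAS AND PROOFS =====

-- closed form both loops reach: the pairs emitted scanning tl with accumulated prefix pre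
def pvPairs (pre : List String) : List String → List (List String × List String)
  | [] => []
  | w :: tl => (if pre = [] then [] else [(pre, pre ++ [w])]) ++ pvPairs (pre ++ [w]) tl

theorem pv_B_loop (tl : List String) : ∀ (pre : List String) (acc : List (List String × List String)),
    (tl.foldl (fun st w =>
        let prev := st.1
        let prefx := st.1 ++ [w]
        (prefx, if prev ≠ [] then st.2 ++ [(prev, prefx)] else st.2)) (pre, acc)).2
      = acc ++ pvPairs pre tl := by
  induction tl with
  | nil => intro pre acc; simp [pvPairs]
  | cons w tl ih =>
    intro pre acc
    simp only [List.foldl_cons, pvPairs]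
    rw [ih]
    by_cases h : pre = [] <;> simp [h]

theorem pv_A_loop (words : List String) :
    ∀ (tl : List String) (j : Nat) (acc : List (List String × List String)),
    words.drop j = tl →
    (PySem.List.enumerate tl (j : Int)).foldl (fun acc p =>
        if p.1 > 0 then
          acc ++ [(PySem.List.slice words none (some p.1),
                   PySem.List.slice words none (some (p.1 + 1)))]
        else acc) acc
      = acc ++ pvPairs (words.take j) tl := by
  intro tl
  induction tl with
  | nil => intro j acc _; simp [PySem.List.enumerate, pvPairs]
  | cons w tl ih =>
    intro j acc hdrop
    have hj : j < words.length := by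
      by_contra h
      rw [List.drop_eq_nil_of_le (by omega)] at hdrop
      exact List.cons_ne_nil w tl hdrop.symm
    have hget : words[j]? = some w := by
      have h0 : (words.drop j)[0]? = some w := by rw [hdrop]; rfl
      simpa using h0
    have htake : words.take (j + 1) = words.take j ++ [w] := by
      rw [List.take_add_one, hget]; rfl
    have hdrop' : words.drop (j + 1) = tl := by
      have h1 : words.drop (j + 1) = (words.drop j).drop 1 := by
        rw [List.drop_drop]
      rw [h1, hdrop]; rfl
    rw [PySem.List.enumerate_cons]
    simp only [List.foldl_cons]
    have hcast : ((j : Int) + 1) = (((j + 1 : Nat)) : Int) := by push_cast; ring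
    rw [hcast, ih (j + 1) _ hdrop']
    rw [PySem.List.slice_to_natCast, PySem.List.slice_to_natCast, htake]
    by_cases hj0 : j = 0
    · subst hj0
      simp [pvPairs]
    · have hpre : words.take j ≠ [] := by
        simp only [ne_eq, List.take_eq_nil_iff]
        intro h
        rcases h with h | h
        · omega
        · subst h; simp at hj
      have hcond : ((j : Int) > 0) := by
        have : 0 < j := Nat.pos_of_ne_zero hj0
        exact_mod_cast this
      simp only [pvPairs, if_pos hcond, if_neg hpre]
      simp

theorem pv_words_eq (phrase : String) :
    PySem.List.insert (PySem.Str.split₀ phrase) 0 "#BEGIN#" ++ ["#END#"]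
      = "#BEGIN#" :: PySem.Str.split₀ phrase ++ ["#END#"] := by
  rw [PySem.List.insert_zero]

-- ===== VERDICT (by name: the statement is the Claim_ definition above) =====
theorem load_phrase_data_spec : Claim_equal_load_phrase_data := by
  intro phrase _
  unfold Spec_load_phrase_data load_phrase_data load_phrase_data_alt
  simp only [pv_words_eq]
  rw [pv_B_loop]
  have h := pv_A_loop ("#BEGIN#" :: PySem.Str.split₀ phrase ++ ["#END#"])
      ("#BEGIN#" :: PySem.Str.split₀ phrase ++ ["#END#"]) 0 [] (by simp)
  simpa using h
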